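-- pv_equiv track=rewrite | github.com/yrpatel2222/Search-Video-Games-Python-CVS-Project | searchvidgamecvs.py | by_dev
-- ===== SOURCE A (Python) =====
-- from operator import itemgetter
--
-- def by_dev(master_D,developer):
--     '''returns a sorted list of games by a given developer, sorted by release year. master_D (dict) -> A dictionary mapping game names to their data. developer (str) -> The developer to filter games by.'''
--     dev_games = []
--     list_of_games = []
--     for game, data in master_D.items():
--         pull_developer = data[1]
--         if developer in pull_developer:
--             dev_games.append((game, data[0][-4:]))
--     dev_games.sort(key=itemgetter(1),reverse = True)
--
--     for i in dev_games:
--         list_of_games.append(i[0])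
--     return list_of_games
--
--     dev_games.sort(key=itemgetter(1, 0), reverse=True)
--     return [game[0] for game in dev_games]
--     pass   # remove this line
-- ===== SOURCE B (Python) =====
-- def _matches(developer, data):
--     return developer in data[1]
--
-- def _year(data):
--     return data[0][-4:]
--
-- def by_dev(master_D, developer):
--     '''returns a sorted list of games by a given developer, sorted by release year. master_D (dict) -> A dictionary mapping game names to their data. developer (str) -> The developer to filter games by.'''
--     years = []
--     for game, data in master_D.items():
--         if _matches(developer, data) and _year(data) not in years:
--             years.append(_year(data))
--     years.sort(reverse=True)
--     list_of_games = []
--     for y in years: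
--         for game, data in master_D.items():
--             if _matches(developer, data) and _year(data) == y:
--                 list_of_games.append(game)
--     return list_of_games
-- ===== Notes on version B (the rewrite author's own statement) =====
-- stated objective: alternative
-- what changed: Instead of building a (game, year) pair list, stable-reverse-sorting it and projecting, B first collects the distinct year strings of matching games, sorts the years descending, and then emits the games by re-scanning the input once per year; stability of A's sort corresponds to input order within each year group.
import Mathlib
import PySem

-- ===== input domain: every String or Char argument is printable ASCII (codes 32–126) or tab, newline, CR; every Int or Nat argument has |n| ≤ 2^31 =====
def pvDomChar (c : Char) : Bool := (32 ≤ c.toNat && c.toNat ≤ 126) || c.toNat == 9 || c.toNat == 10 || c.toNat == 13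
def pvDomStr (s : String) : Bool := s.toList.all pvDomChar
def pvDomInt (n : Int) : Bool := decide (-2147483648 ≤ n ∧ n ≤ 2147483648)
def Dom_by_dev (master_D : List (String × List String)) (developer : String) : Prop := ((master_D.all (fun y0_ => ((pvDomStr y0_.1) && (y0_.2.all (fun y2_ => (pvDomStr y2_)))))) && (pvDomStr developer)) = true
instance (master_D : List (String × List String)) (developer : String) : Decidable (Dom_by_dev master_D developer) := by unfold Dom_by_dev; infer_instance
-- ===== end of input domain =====

-- B replaces A's pair-list + stable reverse sort + projection by: collect the distinct
-- year strings of matching games, sort them descending, then re-scan the input once per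
-- year emitting its games (alternative decomposition, same result).

-- ===== PORT A =====
def by_dev (master_D : List (String × List String)) (developer : String) : List String :=
  -- for game, data in master_D.items(): … (the dict parameter is modelled by Dict.ofList)
  let dev_games := (PySem.Dict.ofList master_D).items.foldl
    (fun acc p =>
      let pull_developer := PySem.List.pyGetD p.2 1 ""   -- data[1]; in range under Pre_
      if PySem.Str.isIn developer pull_developer then
        acc ++ [(p.1, PySem.Str.slice (PySem.List.pyGetD p.2 0 "") (some (-4)) none)]  -- data[0][-4:]
      else acc) []
  let dev_games := PySem.List.sorted dev_games (fun i => i.2) true  -- sort(key=itemgetter(1), reverse=True)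
  dev_games.foldl (fun acc i => acc ++ [i.1]) []

-- ===== PORT B =====
def bd_matches (developer : String) (data : List String) : Bool :=
  PySem.Str.isIn developer (PySem.List.pyGetD data 1 "")   -- developer in data[1]
def bd_year (data : List String) : String :=
  PySem.Str.slice (PySem.List.pyGetD data 0 "") (some (-4)) none   -- data[0][-4:]

def by_dev_alt (master_D : List (String × List String)) (developer : String) : List String :=
  let items := (PySem.Dict.ofList master_D).items
  -- if _matches(...) and _year(data) not in years: years.append(_year(data))
  let years : PySem.Set String := items.foldl
    (fun ys p => if bd_matches developer p.2 then PySem.Set.add ys (bd_year p.2) else ys) []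
  let years := PySem.List.sorted years (fun y => y) true   -- years.sort(reverse=True)
  years.foldl (fun out y =>
    items.foldl (fun out2 p =>
      if bd_matches developer p.2 && (bd_year p.2 == y) then out2 ++ [p.1] else out2) out) []

-- ===== PRECONDITION & SPEC =====
-- Pre_ excludes exactly the inputs where Python A raises IndexError: an entry of the
-- dict (its final value after duplicate-key overwrite) whose data list has fewer than 2 elements.
def Pre_by_dev (master_D : List (String × List String)) (developer : String) : Prop :=
  ∀ p ∈ (PySem.Dict.ofList master_D).items, 2 ≤ p.2.length
instance (master_D : List (String × List String)) (developer : String) : Decidable (Pre_by_dev master_D developer) := by unfold Pre_by_dev; infer_instance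
def pvWitness_by_dev : (List (String × List String)) × String :=
  ([("Halo", ["Nov 15, 2001", "Bungie"]), ("Myth", ["1997", "Bungie Inc"])], "Bungie")
def Spec_by_dev (master_D : List (String × List String)) (developer : String) (out : List String) : Prop := out = by_dev_alt master_D developer
instance (master_D : List (String × List String)) (developer : String) (out : List String) : Decidable (Spec_by_dev master_D developer out) := by unfold Spec_by_dev; infer_instance

-- ===== CLAIM (what is proved, stated in full; the proofs are below) =====
def Claim_equal_by_dev : Prop := ∀ (master_D : List (String × List String)) (developer : String), Dom_by_dev master_D developer → Pre_by_dev master_D developer → Spec_by_dev master_D developer (by_dev master_D developer)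

-- ===== LEMMAS AND PROOFS =====

def flatG (ks : List String) (l : List (String × String)) : List (String × String) :=
  ks.flatMap (fun y => l.filter (fun q => q.2 == y))

theorem insertBy_cons {α : Type} (before : α → α → Bool) (x y : α) (ys : List α) :
    PySem.List.insertBy before x (y :: ys) =
      if before x y then x :: y :: ys else y :: PySem.List.insertBy before x ys := by
  simp [PySem.List.insertBy]

theorem insertBy_append_not_before {α : Type} (before : α → α → Bool) (x : α) (as bs : List α)
    (h : ∀ a ∈ as, before x a = false) :
    PySem.List.insertBy before x (as ++ bs) = as ++ PySem.List.insertBy before x bs := by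
  induction as with
  | nil => simp
  | cons a as ih =>
    simp only [List.mem_cons] at h
    simp [insertBy_cons, h a (Or.inl rfl), ih (fun a ha => h a (Or.inr ha))]

theorem mem_flatG_snd {ks : List String} {l : List (String × String)} {q : String × String}
    (h : q ∈ flatG ks l) : q.2 ∈ ks := by
  simp only [flatG, List.mem_flatMap, List.mem_filter] at h
  obtain ⟨y, hy, _, he⟩ := h
  simpa [beq_iff_eq.mp he] using hy

theorem flatG_append_single_not_mem (ks : List String) (l : List (String × String))
    (x : String × String) (hx : x.2 ∉ ks) : flatG ks (l ++ [x]) = flatG ks l := by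
  induction ks with
  | nil => rfl
  | cons y ks ih =>
    simp only [List.mem_cons, not_or] at hx
    have hxy : (x.2 == y) = false := beq_eq_false_iff_ne.mpr hx.1
    have h1 : flatG (y :: ks) (l ++ [x])
        = (l ++ [x]).filter (fun q => q.2 == y) ++ flatG ks (l ++ [x]) := by simp [flatG]
    have h2 : flatG (y :: ks) l = l.filter (fun q => q.2 == y) ++ flatG ks l := by simp [flatG]
    rw [h1, h2, ih hx.2, List.filter_append]
    simp [hxy]

theorem insertBy_flatG (ks : List String) (l : List (String × String)) (x : String × String)
    (hks : ks.Pairwise (fun a b => b < a)) (hx : x.2 ∈ ks) :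
    PySem.List.insertBy (fun a b => decide (b.2 < a.2)) x (flatG ks l) = flatG ks (l ++ [x]) := by
  induction ks with
  | nil => cases hx
  | cons y ks ih =>
    rcases List.pairwise_cons.mp hks with ⟨hy, hks'⟩
    have hflat : flatG (y :: ks) l = l.filter (fun q => q.2 == y) ++ flatG ks l := by
      simp [flatG]
    have hflat' : flatG (y :: ks) (l ++ [x])
        = (l ++ [x]).filter (fun q => q.2 == y) ++ flatG ks (l ++ [x]) := by simp [flatG]
    by_cases hxy : x.2 = y
    · have hnb : ∀ a ∈ l.filter (fun q => q.2 == y), (decide (a.2 < x.2)) = false := by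
        intro a ha
        have hay : a.2 = y := beq_iff_eq.mp (List.mem_filter.mp ha).2
        exact decide_eq_false (by rw [hay, hxy]; exact lt_irrefl y)
      have hnin : x.2 ∉ ks := fun hmem => absurd (hy _ hmem) (by rw [hxy]; exact lt_irrefl y)
      rw [hflat, insertBy_append_not_before _ _ _ _ hnb]
      have hhead : PySem.List.insertBy (fun a b => decide (b.2 < a.2)) x (flatG ks l)
          = x :: flatG ks l := by
        cases hfg : flatG ks l with
        | nil => rfl
        | cons c t =>
          have hc : c.2 ∈ ks := mem_flatG_snd (by rw [hfg]; exact List.mem_cons_self)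
          have hct : (decide (c.2 < x.2)) = true := decide_eq_true (by rw [hxy]; exact hy _ hc)
          rw [insertBy_cons, if_pos hct]
      rw [hhead, hflat', flatG_append_single_not_mem ks l x hnin, List.filter_append]
      simp [hxy]
    · have hxks : x.2 ∈ ks := by
        rcases List.mem_cons.mp hx with h | h
        · exact absurd h hxy
        · exact h
      have hlt : x.2 < y := hy _ hxks
      have hnb : ∀ a ∈ l.filter (fun q => q.2 == y), (decide (a.2 < x.2)) = false := by
        intro a ha
        have hay : a.2 = y := beq_iff_eq.mp (List.mem_filter.mp ha).2
        exact decide_eq_false (by rw [hay]; exact lt_asymm hlt)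
      rw [hflat, insertBy_append_not_before _ _ _ _ hnb, ih hks' hxks, hflat',
        List.filter_append]
      simp [beq_eq_false_iff_ne.mpr hxy]

theorem sorted_eq_flatG (l : List (String × String)) (ks : List String)
    (hks : ks.Pairwise (fun a b => b < a)) (hl : ∀ q ∈ l, q.2 ∈ ks) :
    PySem.List.sorted l (fun i => i.2) true = flatG ks l := by
  induction l using List.reverseRecOn with
  | nil => simp [PySem.List.sorted, flatG]
  | append_singleton l x ih =>
    have hl' : ∀ q ∈ l, q.2 ∈ ks := fun q hq => hl q (List.mem_append_left _ hq)
    have hx : x.2 ∈ ks := hl x (by simp)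
    rw [PySem.List.sorted_rev_eq_foldl_insertBy, List.foldl_append,
      ← PySem.List.sorted_rev_eq_foldl_insertBy, ih hl']
    simpa using insertBy_flatG ks l x hks hx

def gcond (developer : String) (p : String × List String) : Bool :=
  bd_matches developer p.2
def gpair (p : String × List String) : String × String := (p.1, bd_year p.2)

theorem ks_pairwise (ys : List String) :
    (PySem.List.sorted (PySem.Set.ofList ys) (fun y => y) true).Pairwise (fun a b => b < a) := by
  have h1 := PySem.List.sorted_pairwise_rev (PySem.Set.ofList ys) (fun y => y)
  have hnd : (PySem.List.sorted (PySem.Set.ofList ys) (fun y => y) true).Nodup :=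
    (PySem.List.sorted_perm (PySem.Set.ofList ys) (fun y => y) true).nodup_iff.mpr
      (PySem.Set.nodup_ofList ys)
  exact (h1.and hnd).imp (fun h => lt_of_le_of_ne h.1 (fun e => h.2 e.symm))

-- B's years accumulation = set of the years of the matching entries (first occurrences)
theorem years_fold_eq (developer : String) (items : List (String × List String))
    (ys : PySem.Set String) :
    items.foldl (fun ys p => if bd_matches developer p.2 then PySem.Set.add ys (bd_year p.2) else ys) ys
      = PySem.Set.update ys (((items.filter (gcond developer)).map gpair).map Prod.snd) := by
  induction items generalizing ys with
  | nil => rfl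
  | cons p items ih =>
    by_cases h : bd_matches developer p.2 <;>
      simp [h, ih, gcond, gpair, PySem.Set.update, List.filter_cons]

-- B's inner scan over the input = the per-year group of the filtered/mapped pair list
theorem inner_fold_eq (developer : String) (items : List (String × List String))
    (y : String) (acc : List String) :
    items.foldl (fun out2 p =>
        if bd_matches developer p.2 && (bd_year p.2 == y) then out2 ++ [p.1] else out2) acc
      = acc ++ ((((items.filter (gcond developer)).map gpair).filter (fun q => q.2 == y)).map Prod.fst) := by
  induction items generalizing acc with
  | nil => simp
  | cons p items ih =>
    by_cases h : bd_matches developer p.2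
    · by_cases hy : bd_year p.2 = y
      · have hc : (bd_matches developer p.2 && (bd_year p.2 == y)) = true := by simp [h, hy]
        rw [List.foldl_cons, if_pos hc, ih]
        simp [gcond, gpair, List.filter_cons, h, hy]
      · have hc : (bd_matches developer p.2 && (bd_year p.2 == y)) = false := by simp [h, hy]
        rw [List.foldl_cons, if_neg (by simp [hc]), ih]
        simp [gcond, gpair, List.filter_cons, h, hy]
    · have hc : (bd_matches developer p.2 && (bd_year p.2 == y)) = false := by simp [h]
      rw [List.foldl_cons, if_neg (by simp [hc]), ih]
      simp [gcond, List.filter_cons, h]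

theorem main_eq (items : List (String × List String)) (developer : String) :
    (PySem.List.sorted
        (items.foldl (fun acc p => if gcond developer p then acc ++ [gpair p] else acc) [])
        (fun i => i.2) true).foldl (fun acc i => acc ++ [i.1]) []
    = (PySem.List.sorted
        (items.foldl (fun ys p => if bd_matches developer p.2 then PySem.Set.add ys (bd_year p.2) else ys) [])
        (fun y => y) true).foldl (fun out y =>
          items.foldl (fun out2 p =>
            if bd_matches developer p.2 && (bd_year p.2 == y) then out2 ++ [p.1] else out2) out) [] := by
  rw [PySem.List.foldl_append_if (gcond developer) gpair items []]
  set l := (items.filter (gcond developer)).map gpair with hl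
  simp only [List.nil_append]
  rw [PySem.List.foldl_append_singleton_eq_map (fun i => i.1)
    (PySem.List.sorted l (fun i => i.2) true) []]
  rw [years_fold_eq developer items []]
  have hupd : PySem.Set.update ([] : PySem.Set String) (l.map Prod.snd)
      = PySem.Set.ofList (l.map Prod.snd) := rfl
  rw [hupd]
  set ks := PySem.List.sorted (PySem.Set.ofList (l.map Prod.snd)) (fun y => y) true with hks
  have hmem : ∀ q ∈ l, q.2 ∈ ks := by
    intro q hq
    rw [hks, PySem.List.mem_sorted]
    exact (PySem.Set.mem_ofList _ _).mpr (List.mem_map_of_mem hq)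
  rw [sorted_eq_flatG l ks (ks_pairwise _) hmem]
  have houter : ∀ (ks' : List String) (acc : List String),
      ks'.foldl (fun out y =>
          items.foldl (fun out2 p =>
            if bd_matches developer p.2 && (bd_year p.2 == y) then out2 ++ [p.1] else out2) out) acc
        = acc ++ ks'.flatMap (fun y => (l.filter (fun q => q.2 == y)).map Prod.fst) := by
    intro ks' ; induction ks' with
    | nil => intro acc; simp
    | cons y ks' ih =>
      intro acc
      rw [List.foldl_cons, ih, inner_fold_eq developer items y acc, ← hl]
      simp [List.flatMap_cons]
  rw [houter ks []]
  simp [flatG, List.map_flatMap]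

-- ===== VERDICT (by name: the statement is the Claim_ definition above) =====
theorem by_dev_spec : Claim_equal_by_dev := by
  intro master_D developer _ _
  unfold Spec_by_dev by_dev by_dev_alt
  have := main_eq (PySem.Dict.ofList master_D).items developer
  simpa [gcond, gpair, bd_matches, bd_year] using this
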